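-- pv_equiv track=rewrite | github.com/Zetinator/just_code | python/leetcode/mr_x_and_his_shots.py | solve
-- ===== SOURCE A (Python) =====
-- from bisect import bisect_left, bisect_right
--
-- def solve(shots, players):
--     """interval tree... or binary search...
--     """
--     start, end = [], []
--     # separate starts and ends points...
--     for shot in shots:
--         i, j = shot
--         start.append(i)
--         end.append(j)
--     # sort...
--     start.sort()
--     end.sort()
--     res = 0
--     # find with binary search how many intervals to consider...
--     for player in players:
--         i, j = player
--         res += bisect_right(start, j) - bisect_left(end, i)
--     return res
-- ===== SOURCE B (Python) =====
-- def solve(shots, players):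
--     """Same count, but no sorting / binary search: for each player (i, j),
--     one linear scan over shots keeping two counters mirrors the formula
--     #(start <= j) - #(end < i)."""
--     res = 0
--     for i, j in players:
--         le = 0
--         lt = 0
--         for s, e in shots:
--             if s <= j:
--                 le += 1
--             if e < i:
--                 lt += 1
--         res += le - lt
--     return res
-- ===== Notes on version B (the rewrite author's own statement) =====
-- stated objective: simpler
-- what changed: Replaces building, sorting and binary-searching separate start/end arrays with a direct per-player linear scan over shots keeping two counters (#start<=j and #end<i).
import Mathlib
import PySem

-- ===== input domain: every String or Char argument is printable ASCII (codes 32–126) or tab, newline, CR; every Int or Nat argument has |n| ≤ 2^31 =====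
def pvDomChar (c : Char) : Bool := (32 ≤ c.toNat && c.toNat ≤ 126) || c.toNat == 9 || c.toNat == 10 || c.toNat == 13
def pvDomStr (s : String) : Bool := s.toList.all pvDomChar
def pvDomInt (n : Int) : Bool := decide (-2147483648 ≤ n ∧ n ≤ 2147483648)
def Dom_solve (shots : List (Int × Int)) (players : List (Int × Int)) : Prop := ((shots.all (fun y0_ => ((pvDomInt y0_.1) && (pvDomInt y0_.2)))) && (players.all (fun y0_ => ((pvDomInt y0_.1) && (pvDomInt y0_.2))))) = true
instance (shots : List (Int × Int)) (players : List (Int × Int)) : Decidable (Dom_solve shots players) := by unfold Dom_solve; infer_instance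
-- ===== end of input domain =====

-- B drops A's sort + per-player binary search for a per-player linear scan with two counters; objective: simpler.

-- ===== PORT A =====
def solve (shots : List (Int × Int)) (players : List (Int × Int)) : Int :=
  -- start, end = [], []; for shot in shots: start.append(i); end.append(j)
  let se := shots.foldl (fun (acc : List Int × List Int) shot =>
      (acc.1 ++ [shot.1], acc.2 ++ [shot.2])) ([], [])
  -- start.sort(); end.sort()
  let start := PySem.List.sorted se.1 (fun x => x)
  let end_ := PySem.List.sorted se.2 (fun x => x)
  -- for player in players: res += bisect_right(start, j) - bisect_left(end, i)
  players.foldl (fun res player =>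
      res + ((PySem.List.bisectRight start player.2 : Int)
             - (PySem.List.bisectLeft end_ player.1 : Int))) 0

-- ===== PORT B =====
def solve_alt (shots : List (Int × Int)) (players : List (Int × Int)) : Int :=
  players.foldl (fun res player =>
    let c := shots.foldl (fun (c : Int × Int) shot =>
        ((if shot.1 ≤ player.2 then c.1 + 1 else c.1),
         (if shot.2 < player.1 then c.2 + 1 else c.2))) (0, 0)
    res + (c.1 - c.2)) 0

-- ===== PRECONDITION & SPEC =====
def Spec_solve (shots : List (Int × Int)) (players : List (Int × Int)) (out : Int) : Prop := out = solve_alt shots players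
instance (shots : List (Int × Int)) (players : List (Int × Int)) (out : Int) : Decidable (Spec_solve shots players out) := by unfold Spec_solve; infer_instance

-- ===== CLAIM (what is proved, stated in full; the proofs are below) =====
def Claim_equal_solve : Prop := ∀ (shots : List (Int × Int)) (players : List (Int × Int)), Dom_solve shots players → Spec_solve shots players (solve shots players)

-- ===== LEMMAS AND PROOFS =====

-- countP of a list whose first k positions satisfy p and the rest refute it is k
theorem countP_eq_of_split (p : Int → Bool) :
    ∀ (xs : List Int) (k : Nat), k ≤ xs.length →
      (∀ (j : Nat) (hj : j < xs.length), j < k → p xs[j] = true) →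
      (∀ (j : Nat) (hj : j < xs.length), k ≤ j → ¬ p xs[j] = true) →
      xs.countP p = k := by
  intro xs
  induction xs with
  | nil => intro k hk _ _; simp at hk ⊢; omega
  | cons a t ih =>
    intro k hk hlo hhi
    cases k with
    | zero =>
      rw [List.countP_eq_zero.mpr]
      intro x hx
      rcases List.getElem_of_mem hx with ⟨j, hj, rfl⟩
      exact hhi j hj (Nat.zero_le _)
    | succ k =>
      have ha : p a = true := by
        have := hlo 0 (by simp) (Nat.succ_pos k); simpa using this
      have ht : t.countP p = k := by
        apply ih k (by simpa using hk)
        · intro j hj hjk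
          have := hlo (j+1) (by simpa using Nat.succ_lt_succ hj) (Nat.succ_lt_succ hjk)
          simpa using this
        · intro j hj hjk
          have := hhi (j+1) (by simpa using Nat.succ_lt_succ hj) (Nat.succ_le_succ hjk)
          simpa using this
      rw [List.countP_cons, ha, ht]; simp

theorem bisectRight_eq_countP (xs : List Int) (x : Int)
    (h : xs.Pairwise (fun a b => a ≤ b)) :
    PySem.List.bisectRight xs x = xs.countP (fun a => a ≤ x) := by
  obtain ⟨hle, hlo, hhi⟩ := PySem.List.bisectRight_spec xs x h
  exact (countP_eq_of_split _ xs _ hle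
    (fun j hj hjk => by simpa using hlo j hj hjk)
    (fun j hj hjk => by simpa using not_le.mpr (hhi j hj hjk))).symm

theorem bisectLeft_eq_countP (xs : List Int) (x : Int)
    (h : xs.Pairwise (fun a b => a ≤ b)) :
    PySem.List.bisectLeft xs x = xs.countP (fun a => a < x) := by
  obtain ⟨hle, hlo, hhi⟩ := PySem.List.bisectLeft_spec xs x h
  exact (countP_eq_of_split _ xs _ hle
    (fun j hj hjk => by simpa using hlo j hj hjk)
    (fun j hj hjk => by simpa using not_lt.mpr (hhi j hj hjk))).symm

-- A's start/end-building fold is the pair of projections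
theorem build_se (shots : List (Int × Int)) :
    ∀ (as bs : List Int),
      shots.foldl (fun (acc : List Int × List Int) shot =>
        (acc.1 ++ [shot.1], acc.2 ++ [shot.2])) (as, bs)
      = (as ++ shots.map Prod.fst, bs ++ shots.map Prod.snd) := by
  induction shots with
  | nil => intro as bs; simp
  | cons s t ih => intro as bs; simp [List.foldl_cons, ih]

-- B's inner two-counter fold is the pair of counts
theorem inner_counts (i j : Int) (shots : List (Int × Int)) :
    ∀ (a b : Int),
      shots.foldl (fun (c : Int × Int) shot =>
        ((if shot.1 ≤ j then c.1 + 1 else c.1),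
         (if shot.2 < i then c.2 + 1 else c.2))) (a, b)
      = (a + shots.countP (fun s => s.1 ≤ j), b + shots.countP (fun s => s.2 < i)) := by
  induction shots with
  | nil => intro a b; simp
  | cons s t ih =>
    intro a b
    simp only [List.foldl_cons, ih, List.countP_cons]
    apply Prod.ext <;> simp only [decide_eq_true_eq] <;> split_ifs <;> push_cast <;> omega

-- ===== VERDICT (by name: the statement is the Claim_ definition above) =====
theorem solve_spec : Claim_equal_solve := by
  intro shots players _
  unfold Spec_solve solve solve_alt
  rw [build_se shots [] []]
  simp only [List.nil_append]
  congr 1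
  funext res player
  rw [inner_counts]
  have hs := PySem.List.sorted_pairwise (xs := shots.map Prod.fst) (key := fun x => x)
  have he := PySem.List.sorted_pairwise (xs := shots.map Prod.snd) (key := fun x => x)
  rw [bisectRight_eq_countP _ _ hs, bisectLeft_eq_countP _ _ he,
      (PySem.List.sorted_perm (shots.map Prod.fst) (fun x => x) false).countP_eq,
      (PySem.List.sorted_perm (shots.map Prod.snd) (fun x => x) false).countP_eq,
      List.countP_map, List.countP_map]
  push_cast
  ring_nf
  rfl
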